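-- pv_equiv track=rewrite | github.com/mromer99/ui-stream-processing-system | components/live_results_panel.py | _extract_java_name
-- ===== SOURCE A (Python) =====
-- def _extract_java_name(cmd, pid):
--     if '.jar' in cmd:
--         jar_parts = [p for p in cmd.split() if '.jar' in p]
--         if jar_parts:
--             jar_name = jar_parts[0].split('/')[-1].replace('.jar', '')
--             return f"java-{jar_name}"
--     else:
--         for part in cmd.split():
--             if part.startswith('org.') or part.startswith('com.'):
--                 main_class = part.split('.')[-1]
--                 return f"java-{main_class}"
--     return f"java-{pid}"
-- ===== SOURCE B (Python) =====
-- def _extract_java_name(cmd, pid):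
--     # Character-index algorithm: no tokenization of the whole command.
--     i = cmd.find('.jar')
--     if i >= 0:
--         # expand around the first '.jar' occurrence to the surrounding
--         # whitespace-delimited token
--         start = i
--         while start > 0 and not cmd[start - 1].isspace():
--             start -= 1
--         end = i
--         while end < len(cmd) and not cmd[end].isspace():
--             end += 1
--         tok = cmd[start:end]
--         base = tok[tok.rfind('/') + 1:]
--         return "java-" + base.replace('.jar', '')
--     # scan positions for a token start bearing an 'org.'/'com.' prefix
--     j = 0
--     n = len(cmd)
--     while j < n:
--         if (j == 0 or cmd[j - 1].isspace()) and cmd[j:j + 4] in ('org.', 'com.'):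
--             end = j
--             while end < n and not cmd[end].isspace():
--                 end += 1
--             tok = cmd[j:end]
--             return "java-" + tok[tok.rfind('.') + 1:]
--         j += 1
--     return "java-" + str(pid)
-- ===== Notes on version B (the rewrite author's own statement) =====
-- stated objective: alternative
-- what changed: B never tokenizes the command: it locates the first '.jar' occurrence with str.find and expands to the surrounding whitespace boundaries by index arithmetic, otherwise scans character positions for a token start with an 'org.'/'com.' prefix, and extracts the last path/dotted component with rfind slicing instead of split()[-1]; it trades A's C-level str.split for explicit index loops.
import Mathlib
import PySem

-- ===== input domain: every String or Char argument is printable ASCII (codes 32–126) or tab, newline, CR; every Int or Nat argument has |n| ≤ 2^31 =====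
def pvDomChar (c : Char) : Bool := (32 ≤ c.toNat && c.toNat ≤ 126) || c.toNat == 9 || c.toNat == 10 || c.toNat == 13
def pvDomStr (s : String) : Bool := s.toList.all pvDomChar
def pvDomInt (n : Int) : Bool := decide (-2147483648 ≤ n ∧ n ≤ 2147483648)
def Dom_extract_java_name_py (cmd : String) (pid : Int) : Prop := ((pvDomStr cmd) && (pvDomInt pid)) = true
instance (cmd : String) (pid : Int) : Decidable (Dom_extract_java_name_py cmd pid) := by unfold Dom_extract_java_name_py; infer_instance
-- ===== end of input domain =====

set_option maxRecDepth 8192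
set_option maxHeartbeats 1000000

-- B never tokenizes the command: it finds the first '.jar' occurrence and expands to the
-- surrounding whitespace boundaries by index arithmetic (else scans character positions for a
-- token start with an 'org.'/'com.' prefix), extracting last components with rfind slicing;
-- same return value ("alternative" objective, no side effects involved).

-- ===== PORT A =====
-- jar_parts[0].split('/')[-1].replace('.jar', ''): split? with a nonempty separator always
-- returns `some` of a nonempty list, so both .getD defaults are unreachable.
def pvJarName (p : String) : String :=
  PySem.Str.replace ((PySem.List.pyGet? ((PySem.Str.split? p "/").getD []) (-1)).getD "") ".jar" ""

-- part.split('.')[-1] (same remark on the defaults)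
def pvClassName (p : String) : String :=
  (PySem.List.pyGet? ((PySem.Str.split? p ".").getD []) (-1)).getD ""

-- the 'for part in cmd.split():' loop of A's else-branch, with the shared final return inlined
def pvALoop : List String → Int → String
  | [], pid => "java-" ++ PySem.Int.toStr pid
  | p :: rest, pid =>
    if PySem.Str.startswith p "org." || PySem.Str.startswith p "com." then
      "java-" ++ pvClassName p
    else pvALoop rest pid

def extract_java_name_py (cmd : String) (pid : Int) : String :=
  if PySem.Str.isIn ".jar" cmd then
    let jar_parts := (PySem.Str.split₀ cmd).filter (fun p => PySem.Str.isIn ".jar" p)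
    match jar_parts with
    | p :: _ => "java-" ++ pvJarName p
    | [] => "java-" ++ PySem.Int.toStr pid
  else
    pvALoop (PySem.Str.split₀ cmd) pid

-- ===== PORT B =====
-- B works on the character list of cmd (exact: a Python str is its character sequence).
-- 'while start > 0 and not cmd[start-1].isspace(): start -= 1'  (index always in range, getD exact)
def pvExpandL (cs : List Char) : Nat → Nat
  | 0 => 0
  | s + 1 => if PySem.Chars.isspace (cs.getD s ' ') then s + 1 else pvExpandL cs s

-- 'while end < len(cmd) and not cmd[end].isspace(): end += 1'
def pvExpandR (cs : List Char) (e : Nat) : Nat :=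
  if h : e < cs.length then
    if PySem.Chars.isspace cs[e] then e else pvExpandR cs (e + 1)
  else e
termination_by cs.length - e

-- '(j == 0 or cmd[j-1].isspace()) and cmd[j:j+4] in ('org.', 'com.')'
def pvCond (cs : List Char) (j : Nat) : Bool :=
  (decide (j = 0) || PySem.Chars.isspace (cs.getD (j - 1) ' ')) &&
  (PySem.List.slice cs (some (j : Int)) (some ((j : Int) + 4)) == ['o','r','g','.'] ||
   PySem.List.slice cs (some (j : Int)) (some ((j : Int) + 4)) == ['c','o','m','.'])

-- the 'while j < n:' scan of Source B's class branch
def pvClsScan (cs : List Char) (pid : Int) (j : Nat) : String :=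
  if h : j < cs.length then
    if pvCond cs j then
      let e := pvExpandR cs j
      let tok := PySem.List.slice cs (some (j : Int)) (some (e : Int))
      "java-" ++ String.ofList (PySem.List.slice tok (some (PySem.Chars.rfind tok ['.'] + 1)) none)
    else pvClsScan cs pid (j + 1)
  else "java-" ++ PySem.Int.toStr pid
termination_by cs.length - j

def extract_java_name_py_alt (cmd : String) (pid : Int) : String :=
  let cs := cmd.toList
  let i := PySem.Chars.find cs ['.','j','a','r']
  if 0 ≤ i then
    let s := pvExpandL cs i.toNat
    let e := pvExpandR cs i.toNat
    let tok := PySem.List.slice cs (some (s : Int)) (some (e : Int))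
    let base := PySem.List.slice tok (some (PySem.Chars.rfind tok ['/'] + 1)) none
    "java-" ++ String.ofList (PySem.Chars.replace base ['.','j','a','r'] [])
  else pvClsScan cs pid 0

-- ===== PRECONDITION & SPEC =====
def Spec_extract_java_name_py (cmd : String) (pid : Int) (out : String) : Prop := out = extract_java_name_py_alt cmd pid
instance (cmd : String) (pid : Int) (out : String) : Decidable (Spec_extract_java_name_py cmd pid out) := by unfold Spec_extract_java_name_py; infer_instance

-- ===== CLAIM (what is proved, stated in full; the proofs are below) =====
def Claim_equal_extract_java_name_py : Prop := ∀ (cmd : String) (pid : Int), Dom_extract_java_name_py cmd pid → Spec_extract_java_name_py cmd pid (extract_java_name_py cmd pid)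

-- ===== LEMMAS AND PROOFS =====

-- non-space predicate and the run (= token) decomposition of a string
def pvNs (c : Char) : Bool := !PySem.Chars.isspace c

def pvRuns : List Char → List (List Char)
  | [] => []
  | c :: rest =>
    if PySem.Chars.isspace c then pvRuns rest
    else (c :: rest.takeWhile pvNs) :: pvRuns (rest.dropWhile pvNs)
termination_by l => l.length
decreasing_by
  · simp
  · simpa using Nat.lt_succ_of_le (List.length_dropWhile_le _ _)

-- the suffix after the last occurrence of a character (the whole list if absent)
def pvAfterLast (c : Char) (cs : List Char) : List Char :=
  (cs.reverse.takeWhile (fun d => d != c)).reverse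

-- the token (maximal non-space run) around position i
def pvTokAt (cs : List Char) (i : Nat) : List Char :=
  ((cs.take i).reverse.takeWhile pvNs).reverse ++ (cs.drop i).takeWhile pvNs

-- "out is the suffix of cs after the last occurrence of c"
def pvIsLastSuffix (c : Char) (cs out : List Char) : Prop :=
  c ∉ out ∧ ((out = cs ∧ c ∉ cs) ∨ ∃ pre, cs = pre ++ c :: out)

-- String-level class predicate of A's loop
def pvPCls (t : String) : Bool := PySem.Str.startswith t "org." || PySem.Str.startswith t "com."

-- Chars-level class predicate
def pvPClsC (t : List Char) : Bool :=
  PySem.Chars.startswith t ['o','r','g','.'] || PySem.Chars.startswith t ['c','o','m','.']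

theorem pvDropWhile_head {α : Type} (p : α → Bool) (l : List α) (d : α) (z : List α)
    (h : l.dropWhile p = d :: z) : p d = false := by
  induction l with
  | nil => simp at h
  | cons a t ih =>
    by_cases ha : p a
    · simp [List.dropWhile_cons, ha] at h; exact ih h
    · simp [List.dropWhile_cons, ha] at h; simpa [h.1] using ha

theorem pvLast_suffix {c : Char} {cs out : List Char} (h : pvIsLastSuffix c cs out) :
    out <:+ cs := by
  rcases h.2 with ⟨rfl, -⟩ | ⟨pre, rfl⟩
  · exact List.suffix_refl _
  · exact ⟨pre ++ [c], by simp⟩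

theorem pvLast_unique_aux {c : Char} {cs o1 o2 : List Char}
    (h1 : pvIsLastSuffix c cs o1) (h2 : pvIsLastSuffix c cs o2) (hs : o1 <:+ o2) : o1 = o2 := by
  obtain ⟨u, hu⟩ := hs
  cases u with
  | nil => simpa using hu
  | cons x xs =>
    exfalso
    have hlen : o1.length < o2.length := by
      have := congrArg List.length hu; simp at this; omega
    rcases h1.2 with ⟨rfl, hnc⟩ | ⟨p1, hp1⟩
    · have := (pvLast_suffix h2).length_le
      omega
    · rcases h2.2 with ⟨rfl, hnc2⟩ | ⟨p2, hp2⟩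
      · exact hnc2 (hp1 ▸ by simp)
      · have hs1 : c :: o1 <:+ cs := ⟨p1, hp1.symm⟩
        have hs2 : c :: o2 <:+ cs := ⟨p2, hp2.symm⟩
        have hcons : c :: o1 <:+ c :: o2 := by
          rcases List.suffix_or_suffix_of_suffix hs1 hs2 with h | h
          · exact h
          · have := h.length_le; simp at this; omega
        rcases List.suffix_cons_iff.mp hcons with h | h
        · have := congrArg List.length h; simp at this; omega
        · exact h2.1 (h.subset (by simp))

theorem pvLast_unique {c : Char} {cs o1 o2 : List Char}
    (h1 : pvIsLastSuffix c cs o1) (h2 : pvIsLastSuffix c cs o2) : o1 = o2 := by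
  rcases List.suffix_or_suffix_of_suffix (pvLast_suffix h1) (pvLast_suffix h2) with h | h
  · exact pvLast_unique_aux h1 h2 h
  · exact (pvLast_unique_aux h2 h1 h).symm

theorem pvAfterLast_spec (c : Char) (cs : List Char) : pvIsLastSuffix c cs (pvAfterLast c cs) := by
  constructor
  · intro hmem
    have : c ∈ cs.reverse.takeWhile (fun d => d != c) := by
      simpa [pvAfterLast] using hmem
    simpa using List.mem_takeWhile_imp this
  · rcases hcase : cs.reverse.dropWhile (fun d => d != c) with _ | ⟨d, z⟩
    · left
      have htw : cs.reverse.takeWhile (fun d => d != c) = cs.reverse := by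
        conv_rhs => rw [← List.takeWhile_append_dropWhile (p := fun d => d != c) (l := cs.reverse)]
        rw [hcase]; simp
      refine ⟨by simp [pvAfterLast, htw], ?_⟩
      intro hmem
      have : c ∈ cs.reverse.takeWhile (fun d => d != c) := by
        rw [htw]; exact List.mem_reverse.mpr hmem
      simpa using List.mem_takeWhile_imp this
    · right
      have hd : d = c := by simpa using pvDropWhile_head _ _ _ _ hcase
      refine ⟨z.reverse, ?_⟩
      conv_lhs => rw [← List.reverse_reverse cs,
        ← List.takeWhile_append_dropWhile (p := fun d => d != c) (l := cs.reverse), hcase]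
      simp [pvAfterLast, hd]

theorem pvSingleton_prefix (c : Char) (l : List Char) : [c] <+: l ↔ l.head? = some c := by
  cases l <;> simp [List.cons_prefix_cons, eq_comm]

theorem pvRfind_go_spec (cs : List Char) (c : Char) : ∀ j : Nat,
    (PySem.Chars.rfind.go cs [c] j = -1 ∧ ∀ m ≤ j, cs[m]? ≠ some c) ∨
    (∃ k : Nat, k ≤ j ∧ PySem.Chars.rfind.go cs [c] j = (k : Int) ∧ cs[k]? = some c ∧
      ∀ m, k < m → m ≤ j → cs[m]? ≠ some c) := by
  intro j
  induction j with
  | zero =>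
    by_cases h : [c].isPrefixOf cs
    · right
      refine ⟨0, le_refl 0, by simp [PySem.Chars.rfind.go, h], ?_, by omega⟩
      have := (pvSingleton_prefix c cs).mp (List.isPrefixOf_iff_prefix.mp h)
      simpa [← List.head?_eq_getElem?] using this
    · left
      refine ⟨by simp [PySem.Chars.rfind.go, h], ?_⟩
      intro m hm
      have hm0 : m = 0 := by omega
      subst hm0
      intro hget
      exact h (List.isPrefixOf_iff_prefix.mpr ((pvSingleton_prefix c cs).mpr
        (by rw [List.head?_eq_getElem?]; exact hget)))
  | succ j ih =>
    by_cases h : [c].isPrefixOf (cs.drop (j + 1))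
    · right
      refine ⟨j + 1, le_refl _, by simp [PySem.Chars.rfind.go, h], ?_, by omega⟩
      have := (pvSingleton_prefix c _).mp (List.isPrefixOf_iff_prefix.mp h)
      simpa [List.head?_drop] using this
    · have hnot : cs[j + 1]? ≠ some c := by
        intro hget
        exact h (List.isPrefixOf_iff_prefix.mpr ((pvSingleton_prefix c _).mpr
          (by rw [List.head?_drop]; exact hget)))
      have hgo : PySem.Chars.rfind.go cs [c] (j + 1) = PySem.Chars.rfind.go cs [c] j := by
        simp [PySem.Chars.rfind.go, h]
      rcases ih with ⟨heq, hnone⟩ | ⟨k, hk, heq, hget, hnone⟩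
      · left
        refine ⟨hgo ▸ heq, ?_⟩
        intro m hm
        rcases Nat.lt_or_ge m (j + 1) with h' | h'
        · exact hnone m (by omega)
        · have : m = j + 1 := by omega
          simpa [this] using hnot
      · right
        refine ⟨k, by omega, hgo ▸ heq, hget, ?_⟩
        intro m hmk hm
        rcases Nat.lt_or_ge m (j + 1) with h' | h'
        · exact hnone m hmk (by omega)
        · have : m = j + 1 := by omega
          simpa [this] using hnot

theorem pvRfind_ge (cs : List Char) (c : Char) : -1 ≤ PySem.Chars.rfind cs [c] := by
  rcases pvRfind_go_spec cs c cs.length with ⟨h, _⟩ | ⟨k, _, h, _, _⟩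
  · simp [PySem.Chars.rfind, h]
  · rw [PySem.Chars.rfind, h]; omega

theorem pvRfind_afterLast (cs : List Char) (c : Char) :
    cs.drop ((PySem.Chars.rfind cs [c] + 1).toNat) = pvAfterLast c cs := by
  have hrw : PySem.Chars.rfind cs [c] = PySem.Chars.rfind.go cs [c] cs.length := rfl
  rcases pvRfind_go_spec cs c cs.length with ⟨h, hnone⟩ | ⟨k, hk, h, hget, hnone⟩
  · rw [hrw, h]
    have hnc : c ∉ cs := by
      intro hmem
      obtain ⟨m, hm⟩ := List.mem_iff_getElem?.mp hmem
      have hmlt : m < cs.length := (List.getElem?_eq_some_iff.mp hm).1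
      exact hnone m (by omega) hm
    refine pvLast_unique (c := c) (cs := cs) ⟨by simpa using hnc, Or.inl ⟨by simp, hnc⟩⟩
      (pvAfterLast_spec c cs)
  · rw [hrw, h]
    have hk' : ((k : Int) + 1).toNat = k + 1 := by omega
    rw [hk']
    obtain ⟨hlt, hgetel⟩ := List.getElem?_eq_some_iff.mp hget
    refine pvLast_unique (c := c) (cs := cs) ?_ (pvAfterLast_spec c cs)
    constructor
    · intro hmem
      obtain ⟨m, hm⟩ := List.mem_iff_getElem?.mp hmem
      have hm' : cs[k + 1 + m]? = some c := by
        rw [← List.getElem?_drop]; exact hm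
      have hmlt : k + 1 + m < cs.length := (List.getElem?_eq_some_iff.mp hm').1
      exact hnone (k + 1 + m) (by omega) (by omega) hm'
    · right
      refine ⟨cs.take k, ?_⟩
      conv_lhs => rw [← List.take_append_drop k cs, List.drop_eq_getElem_cons hlt, hgetel]

theorem pvSplitOnGo_last (c : Char) : ∀ (l cur : List Char) (acc : List (List Char)) (fuel : Nat),
    l.length < fuel → c ∉ cur →
    ∃ out, (PySem.Chars.splitOn.go [c] fuel l cur acc).getLast? = some out ∧
      pvIsLastSuffix c (cur.reverse ++ l) out := by
  intro l
  induction l with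
  | nil =>
    intro cur acc fuel hfuel hcur
    cases fuel with
    | zero => omega
    | succ f =>
      refine ⟨cur.reverse, ?_, ?_⟩
      · simp [PySem.Chars.splitOn.go, List.getLast?_concat]
      · exact ⟨by simpa using hcur, Or.inl ⟨by simp, by simpa using hcur⟩⟩
  | cons a rest ih =>
    intro cur acc fuel hfuel hcur
    cases fuel with
    | zero => omega
    | succ f =>
      by_cases hac : a = c
      · subst hac
        have hpre : [a].isPrefixOf (a :: rest) = true := by simp [List.isPrefixOf_iff_prefix]
        have hgo : PySem.Chars.splitOn.go [a] (f + 1) (a :: rest) cur acc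
            = PySem.Chars.splitOn.go [a] f rest [] (cur.reverse :: acc) := by
          simp [PySem.Chars.splitOn.go, hpre]
        obtain ⟨out, hlast, hP⟩ := ih [] (cur.reverse :: acc) f (by simp at hfuel ⊢; omega)
          (by simp)
        refine ⟨out, by rw [hgo]; simpa using hlast, hP.1, ?_⟩
        rcases hP.2 with ⟨rfl, hnc⟩ | ⟨pre, hpre'⟩
        · exact Or.inr ⟨cur.reverse, by simp⟩
        · exact Or.inr ⟨cur.reverse ++ a :: pre, by
            simp only [List.reverse_nil, List.nil_append] at hpre'
            rw [hpre']; simp⟩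
      · have hpre : [c].isPrefixOf (a :: rest) = false := by
          by_contra h
          rw [Bool.not_eq_false, List.isPrefixOf_iff_prefix, List.cons_prefix_cons] at h
          exact hac h.1.symm
        have hgo : PySem.Chars.splitOn.go [c] (f + 1) (a :: rest) cur acc
            = PySem.Chars.splitOn.go [c] f rest (a :: cur) acc := by
          simp [PySem.Chars.splitOn.go, hpre]
        obtain ⟨out, hlast, hP⟩ := ih (a :: cur) acc f (by simp at hfuel ⊢; omega)
          (by simp [hcur]; exact fun h => hac h.symm)
        refine ⟨out, by rw [hgo]; exact hlast, ?_⟩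
        have : (a :: cur).reverse ++ rest = cur.reverse ++ a :: rest := by simp
        rwa [this] at hP

theorem pvPyGet_neg_one {α : Type} (l : List α) : PySem.List.pyGet? l (-1) = l.getLast? := by
  cases l with
  | nil => rfl
  | cons a t =>
    simp [PySem.List.pyGet?, PySem.List.pyIdx?, List.getLast?_eq_getElem?]

-- A's s.split(sep)[-1] for a one-character separator is the suffix after its last occurrence
theorem pvSplitLast (s : String) (c : Char) (sep : String) (hsep : sep.toList = [c]) :
    ((PySem.List.pyGet? ((PySem.Str.split? s sep).getD []) (-1)).getD "").toList
      = pvAfterLast c s.toList := by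
  -- identify the Str-level split with the Chars-level one
  have hmap := PySem.Str.split?_map s sep
  rw [hsep] at hmap
  have hsepE : PySem.Chars.split? s.toList [c] = some (PySem.Chars.splitOn s.toList [c]) := by
    simp [PySem.Chars.split?]
  rw [hsepE] at hmap
  obtain ⟨L, hL⟩ : ∃ L, PySem.Str.split? s sep = some L := by
    cases hx : PySem.Str.split? s sep with
    | none => rw [hx] at hmap; simp at hmap
    | some L => exact ⟨L, rfl⟩
  rw [hL] at hmap
  have hLmap : L.map String.toList = PySem.Chars.splitOn s.toList [c] := by simpa using hmap
  obtain ⟨out, hlast, hP⟩ := pvSplitOnGo_last c s.toList [] [] (s.toList.length + 1)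
    (by omega) (by simp)
  have hlast' : (PySem.Chars.splitOn s.toList [c]).getLast? = some out := by
    simpa [PySem.Chars.splitOn] using hlast
  rw [← hLmap, List.getLast?_map] at hlast'
  obtain ⟨w, hw, hwt⟩ : ∃ w, L.getLast? = some w ∧ w.toList = out := by
    cases hx : L.getLast? with
    | none => rw [hx] at hlast'; simp at hlast'
    | some w => rw [hx] at hlast'; exact ⟨w, rfl, by simpa using hlast'⟩
  rw [hL]
  simp only [Option.getD_some, pvPyGet_neg_one, hw]
  rw [hwt]
  have hPcs : pvIsLastSuffix c s.toList out := by simpa using hP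
  exact pvLast_unique hPcs (pvAfterLast_spec c s.toList)

-- split₀ produces exactly the non-space runs
theorem pvGo_acc (rest cur : List Char) (acc : List (List Char)) :
    PySem.Chars.split₀.go rest cur acc = acc.reverse ++ PySem.Chars.split₀.go rest cur [] := by
  induction rest generalizing cur acc with
  | nil => simp only [PySem.Chars.split₀.go]; split <;> simp
  | cons c rest ih =>
    simp only [PySem.Chars.split₀.go]
    by_cases hs : PySem.Chars.isspace c = true
    · simp only [hs, if_true]
      by_cases hc : cur.isEmpty = true
      · simp only [hc, if_true]; exact ih [] acc
      · simp only [hc]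
        rw [ih [] (cur.reverse :: acc), ih [] [cur.reverse]]; simp
    · simp only [hs]; exact ih (c :: cur) acc

theorem pvGo_runs : ∀ (rest cur : List Char),
    PySem.Chars.split₀.go rest cur [] =
      if cur.isEmpty then pvRuns rest
      else (cur.reverse ++ rest.takeWhile pvNs) :: pvRuns (rest.dropWhile pvNs) := by
  intro rest
  induction rest with
  | nil =>
    intro cur
    by_cases hc : cur.isEmpty <;> simp [PySem.Chars.split₀.go, pvRuns, hc]
  | cons c rest ih =>
    intro cur
    by_cases hs : PySem.Chars.isspace c = true
    · have hns : pvNs c = false := by simp [pvNs, hs]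
      by_cases hc : cur.isEmpty
      · simp only [PySem.Chars.split₀.go, hs, if_true, hc]
        rw [ih []]
        simp [pvRuns, hs, hc]
      · simp only [PySem.Chars.split₀.go, hs, if_true, hc, if_false]
        rw [pvGo_acc rest [] [cur.reverse], ih []]
        simp [pvRuns, hs, hns, List.dropWhile_cons]
    · have hns : pvNs c = true := by simp [pvNs, hs]
      simp only [PySem.Chars.split₀.go, hs]
      rw [ih (c :: cur)]
      by_cases hc : cur.isEmpty
      · have : cur = [] := by simpa [List.isEmpty_iff] using hc
        subst this
        simp [pvRuns, hs, List.takeWhile_cons, hns, List.dropWhile_cons]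
      · simp [pvRuns, hs, hc, List.takeWhile_cons, hns, List.dropWhile_cons]

theorem pvSplit0_runs (cs : List Char) : PySem.Chars.split₀ cs = pvRuns cs := by
  simpa [PySem.Chars.split₀] using pvGo_runs cs []

-- takeWhile non-space stops at a space regardless of what follows it
theorem pvTW2 (X Y : List Char) (b : Char) (hb : PySem.Chars.isspace b = true) :
    (X ++ b :: Y).takeWhile pvNs = X.takeWhile pvNs := by
  rw [List.takeWhile_append]
  split
  · next h =>
    have : X.takeWhile pvNs = X :=
      (List.takeWhile_prefix pvNs).eq_of_length h
    simp [this, List.takeWhile_cons, pvNs, hb]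
  · rfl

theorem pvPrefix_takeWhile (p : List Char) (hp : ∀ c ∈ p, PySem.Chars.isspace c = false) :
    ∀ l : List Char, p <+: l → p <+: l.takeWhile pvNs := by
  induction p with
  | nil => intro l _; exact List.nil_prefix
  | cons a q ih =>
    intro l h
    cases l with
    | nil => simp at h
    | cons b t =>
      rw [List.cons_prefix_cons] at h
      obtain ⟨rfl, ht⟩ := h
      have hns : pvNs a = true := by simp [pvNs, hp a (by simp)]
      rw [List.takeWhile_cons, hns]
      exact List.cons_prefix_cons.mpr ⟨rfl, ih (fun c hc => hp c (by simp [hc])) t ht⟩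

theorem pvNoCross (p A Y : List Char) (b : Char)
    (hp : ∀ c ∈ p, PySem.Chars.isspace c = false) (hb : PySem.Chars.isspace b = true)
    (h : p <+: A ++ b :: Y) : p <+: A := by
  rcases Nat.lt_or_ge A.length p.length with hlt | hge
  case inr => exact List.prefix_of_prefix_length_le h (List.prefix_append A (b :: Y)) hge
  case inl =>
    exfalso
    have hblt : A.length < (A ++ b :: Y).length := by simp
    have hgb : (A ++ b :: Y)[A.length] = b := by
      rw [List.getElem_append_right (by omega)]; simp
    have hp' : p[A.length]'hlt = (A ++ b :: Y)[A.length]'hblt := h.getElem hlt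
    have : PySem.Chars.isspace (p[A.length]'hlt) = false := hp _ (List.getElem_mem _)
    rw [hp', hgb] at this
    simp [this] at hb

theorem pvExpandR_eq (cs : List Char) : ∀ e, e ≤ cs.length →
    pvExpandR cs e = e + ((cs.drop e).takeWhile pvNs).length := by
  intro e
  induction hn : cs.length - e using Nat.strong_induction_on generalizing e with
  | _ n ihn =>
    intro he
    rw [pvExpandR]
    by_cases h : e < cs.length
    · rw [dif_pos h, List.drop_eq_getElem_cons h, List.takeWhile_cons]
      by_cases hsp : PySem.Chars.isspace cs[e] = true
      · simp [hsp, pvNs]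
      · have hns : pvNs cs[e] = true := by simp [pvNs, hsp]
        rw [if_neg hsp, hns]
        rw [ihn (cs.length - (e + 1)) (by omega) (e + 1) rfl (by omega)]
        simp; omega
    · rw [dif_neg h]
      have : cs.drop e = [] := List.drop_eq_nil_of_le (by omega)
      simp [this]

theorem pvExpandL_eq (cs : List Char) : ∀ s, s ≤ cs.length →
    pvExpandL cs s = s - ((cs.take s).reverse.takeWhile pvNs).length := by
  intro s
  induction s with
  | zero => intro _; simp [pvExpandL]
  | succ s ih =>
    intro hs
    have hlt : s < cs.length := by omega
    have htake : cs.take (s + 1) = cs.take s ++ [cs[s]] := by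
      rw [List.take_succ]
      simp [List.getElem?_eq_getElem hlt]
    have hgetD : cs.getD s ' ' = cs[s] := by
      simp [List.getD, List.getElem?_eq_getElem hlt]
    rw [pvExpandL, hgetD]
    by_cases hsp : PySem.Chars.isspace cs[s] = true
    · have hns : pvNs cs[s] = false := by simp [pvNs, hsp]
      rw [if_pos hsp]
      have h0 : List.takeWhile pvNs (cs.take (s + 1)).reverse = [] := by
        rw [htake, List.reverse_append]
        simp only [List.reverse_cons, List.reverse_nil, List.nil_append, List.singleton_append,
          List.takeWhile_cons, hns, Bool.false_eq_true, if_false]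
      rw [h0]
      simp
    · have hns : pvNs cs[s] = true := by simp [pvNs, hsp]
      rw [if_neg hsp, ih (by omega)]
      have htw : List.takeWhile pvNs (cs.take (s + 1)).reverse
          = cs[s] :: List.takeWhile pvNs (cs.take s).reverse := by
        rw [htake, List.reverse_append]
        simp only [List.reverse_cons, List.reverse_nil, List.nil_append, List.singleton_append,
          List.takeWhile_cons, hns, if_true]
      rw [htw]
      have hlen : ((cs.take s).reverse.takeWhile pvNs).length ≤ s := by
        have := (List.takeWhile_prefix (l := (cs.take s).reverse) pvNs).length_le
        simpa [Nat.min_eq_left (le_of_lt hlt)] using this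
      simp only [List.length_cons]
      omega

theorem pvTokB (cs : List Char) (i : Nat) (hi : i ≤ cs.length) :
    List.take (pvExpandR cs i - pvExpandL cs i) (List.drop (pvExpandL cs i) cs) = pvTokAt cs i := by
  rw [pvExpandR_eq cs i hi, pvExpandL_eq cs i hi]
  set a := ((cs.take i).reverse.takeWhile pvNs).length with ha
  set b := ((cs.drop i).takeWhile pvNs).length with hb
  have hleni : (cs.take i).length = i := by simp [Nat.min_eq_left hi]
  have hale : a ≤ i := by
    have := (List.takeWhile_prefix (l := (cs.take i).reverse) pvNs).length_le
    simpa [hleni] using this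
  have harith : i + b - (i - a) = a + b := by omega
  rw [harith]
  have hsplit : cs = cs.take i ++ cs.drop i := (List.take_append_drop i cs).symm
  have hdrop : cs.drop (i - a) = (cs.take i).drop (i - a) ++ cs.drop i := by
    conv_lhs => rw [hsplit]
    rw [List.drop_append, hleni]
    have : i - a - i = 0 := by omega
    rw [this, List.drop_zero]
  have hXlen : ((cs.take i).drop (i - a)).length = a := by simp [hleni]; omega
  rw [hdrop, List.take_append, hXlen]
  have h1 : List.take (a + b) ((cs.take i).drop (i - a)) = (cs.take i).drop (i - a) :=
    List.take_of_length_le (by omega)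
  rw [h1]
  simp only [Nat.add_sub_cancel_left, pvTokAt]
  congr 1
  · have htw : (cs.take i).reverse.takeWhile pvNs = ((cs.take i).reverse).take a :=
      List.prefix_iff_eq_take.mp (List.takeWhile_prefix pvNs)
    rw [htw, List.take_reverse, hleni, List.reverse_reverse]
  · exact (List.prefix_iff_eq_take.mp (List.takeWhile_prefix pvNs)).symm

theorem pvTokAt_cons_space (c : Char) (rest : List Char) (i : Nat)
    (hc : PySem.Chars.isspace c = true) : pvTokAt (c :: rest) (i + 1) = pvTokAt rest i := by
  simp only [pvTokAt, List.take_succ_cons, List.drop_succ_cons, List.reverse_cons]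
  rw [pvTW2 _ [] c hc]

-- the first token containing p is the token around p's first occurrence
theorem pvJ (p : List Char) (hp : p ≠ []) (hpns : ∀ c ∈ p, PySem.Chars.isspace c = false) :
    ∀ (n : Nat) (cs : List Char), cs.length ≤ n → ∀ i : Nat, p <+: cs.drop i →
      (∀ k < i, ¬ p <+: cs.drop k) →
      (pvRuns cs).find? (fun t => PySem.Chars.isIn p t) = some (pvTokAt cs i) := by
  intro n
  induction n with
  | zero =>
    intro cs hlen i hpre _
    have hnil : cs = [] := List.length_eq_zero_iff.mp (by omega)
    subst hnil
    rw [List.drop_nil] at hpre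
    exact absurd (List.prefix_nil.mp hpre) hp
  | succ n ihn =>
    intro cs hlen i hpre hmin
    cases cs with
    | nil =>
      rw [List.drop_nil] at hpre
      exact absurd (List.prefix_nil.mp hpre) hp
    | cons c rest =>
      by_cases hs : PySem.Chars.isspace c = true
      · -- space head: the first occurrence cannot start at position 0
        cases i with
        | zero =>
          exfalso
          cases p with
          | nil => exact hp rfl
          | cons q qt =>
            rw [List.drop_zero, List.cons_prefix_cons] at hpre
            have hq := hpns q (by simp)
            rw [hpre.1, hs] at hq
            simp at hq
        | succ i =>
          have hruns : pvRuns (c :: rest) = pvRuns rest := by simp [pvRuns, hs]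
          rw [hruns, pvTokAt_cons_space c rest i hs]
          exact ihn rest (by simp at hlen; omega) i (by simpa using hpre)
            (fun k hk => by simpa using hmin (k + 1) (by omega))
      · have hnsc : pvNs c = true := by simp [pvNs, hs]
        obtain ⟨T, hT⟩ : ∃ T, rest.takeWhile pvNs = T := ⟨_, rfl⟩
        obtain ⟨R, hR⟩ : ∃ R, rest.dropWhile pvNs = R := ⟨_, rfl⟩
        have hcs : c :: rest = (c :: T) ++ R := by
          rw [List.cons_append, ← hT, ← hR, List.takeWhile_append_dropWhile]
        have hruns : pvRuns (c :: rest) = (c :: T) :: pvRuns R := by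
          simp [pvRuns, hs, hT, hR]
        have htokns : ∀ d ∈ c :: T, pvNs d = true := by
          intro d hd
          rcases List.mem_cons.mp hd with rfl | hd'
          · exact hnsc
          · rw [← hT] at hd'
            exact List.mem_takeWhile_imp hd'
        by_cases hIn : PySem.Chars.isIn p (c :: T) = true
        · rw [hruns, List.find?_cons_of_pos hIn]
          obtain ⟨k, hk⟩ := (PySem.Chars.exists_prefix_drop_iff_isIn p (c :: T)).mpr hIn
          have hklt : k < (c :: T).length := by
            by_contra h
            rw [List.drop_eq_nil_of_le (by omega)] at hk
            exact hp (List.prefix_nil.mp hk)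
          have hkcs : p <+: (c :: rest).drop k := by
            rw [hcs, List.drop_append]
            exact hk.trans (List.prefix_append _ _)
          have hile : i ≤ k := by
            by_contra h
            exact hmin k (by omega) hkcs
          have hilt : i < (c :: T).length := lt_of_le_of_lt hile hklt
          have htake : (c :: rest).take i = (c :: T).take i := by
            rw [hcs, List.take_append]
            have h0 : i - (c :: T).length = 0 := by omega
            rw [h0, List.take_zero, List.append_nil]
          have hdropi : (c :: rest).drop i = (c :: T).drop i ++ R := by
            rw [hcs, List.drop_append]
            have h0 : i - (c :: T).length = 0 := by omega
            rw [h0, List.drop_zero]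
          have htw1 : ((c :: T).take i).reverse.takeWhile pvNs = ((c :: T).take i).reverse :=
            List.takeWhile_eq_self_iff.mpr
              (fun d hd => htokns d (List.take_subset _ _ (List.mem_reverse.mp hd)))
          have htwX : List.takeWhile pvNs ((c :: T).drop i ++ R) = (c :: T).drop i := by
            have hall : List.takeWhile pvNs ((c :: T).drop i) = (c :: T).drop i :=
              List.takeWhile_eq_self_iff.mpr (fun d hd => htokns d (List.drop_subset _ _ hd))
            cases hRc : R with
            | nil => rw [List.append_nil]; exact hall
            | cons sp R' =>
              have hsp : PySem.Chars.isspace sp = true := by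
                have h := pvDropWhile_head pvNs rest sp R' (by rw [hR, hRc])
                simpa [pvNs] using h
              rw [pvTW2 _ _ sp hsp]
              exact hall
          have htok : pvTokAt (c :: rest) i = c :: T := by
            unfold pvTokAt
            rw [htake, hdropi, htw1, List.reverse_reverse, htwX, List.take_append_drop]
          rw [htok]
        · rw [hruns, List.find?_cons_of_neg (by simp [hIn])]
          cases R with
          | nil =>
            exfalso
            have hcseq : c :: rest = c :: T := by rw [hcs, List.append_nil]
            rw [hcseq] at hpre
            exact hIn ((PySem.Chars.exists_prefix_drop_iff_isIn p (c :: T)).mp ⟨i, hpre⟩)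
          | cons sp R' =>
            have hsp : PySem.Chars.isspace sp = true := by
              have h := pvDropWhile_head pvNs rest sp R' (by rw [hR])
              simpa [pvNs] using h
            have hige : (c :: T).length + 1 ≤ i := by
              by_contra hcon
              have hd : (c :: rest).drop i = (c :: T).drop i ++ sp :: R' := by
                rw [hcs, List.drop_append]
                have h0 : i - (c :: T).length = 0 := by omega
                rw [h0, List.drop_zero]
              have hpre2 := hpre
              rw [hd] at hpre2
              have hcross := pvNoCross p ((c :: T).drop i) R' sp hpns hsp hpre2
              exact hIn ((PySem.Chars.exists_prefix_drop_iff_isIn p (c :: T)).mp ⟨i, hcross⟩)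
            have hdrop : (c :: rest).drop i = R'.drop (i - ((c :: T).length + 1)) := by
              rw [hcs, List.drop_append, List.drop_eq_nil_of_le (by omega), List.nil_append]
              have hsub : i - (c :: T).length = (i - ((c :: T).length + 1)) + 1 := by omega
              rw [hsub, List.drop_succ_cons]
            have hpre' := hpre
            rw [hdrop] at hpre'
            have hmin' : ∀ k < i - ((c :: T).length + 1), ¬ p <+: R'.drop k := by
              intro k hk hkpre
              apply hmin ((c :: T).length + 1 + k) (by omega)
              have hdk : (c :: rest).drop ((c :: T).length + 1 + k) = R'.drop k := by
                rw [hcs, List.drop_append, List.drop_eq_nil_of_le (by omega), List.nil_append]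
                have hsub : (c :: T).length + 1 + k - (c :: T).length = k + 1 := by omega
                rw [hsub, List.drop_succ_cons]
              rw [hdk]
              exact hkpre
            have hlen' : R'.length ≤ n := by
              have h1 := List.length_dropWhile_le pvNs rest
              rw [hR] at h1
              simp at h1 hlen
              omega
            have hrunsR : pvRuns (sp :: R') = pvRuns R' := by simp [pvRuns, hsp]
            rw [hrunsR, ihn R' hlen' (i - ((c :: T).length + 1)) hpre' hmin']
            congr 1
            have htake : (c :: rest).take i
                = (c :: T) ++ sp :: R'.take (i - ((c :: T).length + 1)) := by
              rw [hcs, List.take_append, List.take_of_length_le (by omega)]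
              congr 1
              have hsub : i - (c :: T).length = (i - ((c :: T).length + 1)) + 1 := by omega
              rw [hsub, List.take_succ_cons]
            unfold pvTokAt
            rw [htake, hdrop]
            have hrev : ((c :: T) ++ sp :: R'.take (i - ((c :: T).length + 1))).reverse
                = (R'.take (i - ((c :: T).length + 1))).reverse ++ sp :: (c :: T).reverse := by
              simp
            rw [hrev, pvTW2 _ _ sp hsp]

theorem pvALoop_eq (toks : List String) (pid : Int) :
    pvALoop toks pid = match toks.find? pvPCls with
      | some c => "java-" ++ pvClassName c
      | none => "java-" ++ PySem.Int.toStr pid := by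
  induction toks with
  | nil => rfl
  | cons t ts ih =>
    by_cases h : pvPCls t <;> rw [pvPCls] at h <;> simp at h <;>
      simp [pvALoop, pvPCls, h, ih]

theorem pvHead_filter {α : Type} (p : α → Bool) (l : List α) :
    (l.filter p).head? = l.find? p := by
  induction l with
  | nil => rfl
  | cons a l ih => by_cases h : p a <;> simp [h, ih]

-- helpers about Source B's position scan
theorem pvNs_isspace {d : Char} (h : pvNs d = true) : PySem.Chars.isspace d = false := by
  simpa [pvNs] using h

theorem pvStartswith_eq_decide (t p : List Char) :
    PySem.Chars.startswith t p = decide (p <+: t) := by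
  cases hb : PySem.Chars.startswith t p with
  | true => simp [(PySem.Chars.startswith_iff _ _).mp hb]
  | false =>
    have hnp : ¬ p <+: t := fun h => by
      have h2 := (PySem.Chars.startswith_iff t p).mpr h
      rw [h2] at hb
      cases hb
    exact (decide_eq_false hnp).symm

theorem pvPrefix_iff_tok (p cs : List Char) (hp : ∀ c ∈ p, PySem.Chars.isspace c = false) :
    p <+: cs ↔ p <+: cs.takeWhile pvNs :=
  ⟨pvPrefix_takeWhile p hp cs, fun h => h.trans (List.takeWhile_prefix pvNs)⟩

-- single-step unfolding of the scan
theorem pvClsScan_eq (cs : List Char) (pid : Int) (j : Nat) :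
    pvClsScan cs pid j =
      if j < cs.length then
        (if pvCond cs j then
          "java-" ++ String.ofList (PySem.List.slice
            (PySem.List.slice cs (some (j : Int)) (some ((pvExpandR cs j : Nat) : Int)))
            (some (PySem.Chars.rfind
              (PySem.List.slice cs (some (j : Int)) (some ((pvExpandR cs j : Nat) : Int)))
              ['.'] + 1)) none)
        else pvClsScan cs pid (j + 1))
      else "java-" ++ PySem.Int.toStr pid := by
  rw [pvClsScan]
  rfl

theorem pvSliceMatch (cs : List Char) (j : Nat) (p : List Char) (hp4 : p.length = 4) :
    (PySem.List.slice cs (some (j : Int)) (some ((j : Int) + 4)) == p)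
      = decide (p <+: cs.drop j) := by
  have hcast : ((j : Nat) : Int) + 4 = ((j + 4 : Nat) : Int) := by push_cast; ring
  rw [hcast, PySem.List.slice_natCast]
  have h4 : j + 4 - j = 4 := by omega
  rw [h4]
  by_cases h : p <+: cs.drop j
  · have he : (cs.drop j).take 4 = p := by
      rw [← hp4]
      exact (List.prefix_iff_eq_take.mp h).symm
    simp [he, h]
  · have hne : ¬ (cs.drop j).take 4 = p := fun he => h (by
      rw [List.prefix_iff_eq_take, hp4]
      exact he.symm)
    simp [hne, h]

theorem pvCond_zero (cs : List Char) :
    pvCond cs 0 = (decide (['o','r','g','.'] <+: cs.drop 0)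
      || decide (['c','o','m','.'] <+: cs.drop 0)) := by
  unfold pvCond
  rw [pvSliceMatch cs 0 ['o','r','g','.'] rfl, pvSliceMatch cs 0 ['c','o','m','.'] rfl]
  simp

theorem pvCond_false_of_ns (cs : List Char) (j : Nat) (hj : j ≠ 0)
    (hns : PySem.Chars.isspace (cs.getD (j - 1) ' ') = false) : pvCond cs j = false := by
  unfold pvCond
  rw [List.getD_eq_getElem?_getD] at hns
  simp [hj, hns]

theorem pvCond_shift (c : Char) (cs : List Char) (j : Nat)
    (h0 : j = 0 → PySem.Chars.isspace c = true) : pvCond (c :: cs) (j + 1) = pvCond cs j := by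
  have hcast1 : ((j + 1 : Nat) : Int) + 4 = ((j + 5 : Nat) : Int) := by push_cast; ring
  have hcast2 : ((j : Nat) : Int) + 4 = ((j + 4 : Nat) : Int) := by push_cast; ring
  unfold pvCond
  rw [hcast1, hcast2, PySem.List.slice_natCast, PySem.List.slice_natCast]
  have h45 : j + 5 - (j + 1) = 4 := by omega
  have h44 : j + 4 - j = 4 := by omega
  rw [h45, h44, List.drop_succ_cons]
  by_cases hj : j = 0
  · subst hj
    simp [h0 rfl]
  · obtain ⟨k, rfl⟩ := Nat.exists_eq_succ_of_ne_zero hj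
    simp [List.getD_cons_succ]

theorem pvScan_shift : ∀ (k : Nat) (c : Char) (cs : List Char) (pid : Int) (j : Nat),
    cs.length - j ≤ k → (j = 0 → PySem.Chars.isspace c = true) →
    pvClsScan (c :: cs) pid (j + 1) = pvClsScan cs pid j := by
  intro k
  induction k with
  | zero =>
    intro c cs pid j hk h0
    rw [pvClsScan_eq (c :: cs) pid (j + 1), if_neg (by simp only [List.length_cons]; omega)]
    rw [pvClsScan_eq cs pid j, if_neg (by omega)]
  | succ k ih =>
    intro c cs pid j hk h0
    by_cases hjl : j < cs.length
    · rw [pvClsScan_eq (c :: cs) pid (j + 1), pvClsScan_eq cs pid j,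
        if_pos (by simp only [List.length_cons]; omega), if_pos hjl,
        pvCond_shift c cs j h0]
      by_cases hc : pvCond cs j = true
      · rw [if_pos hc, if_pos hc]
        have hE : pvExpandR (c :: cs) (j + 1) = pvExpandR cs j + 1 := by
          rw [pvExpandR_eq (c :: cs) (j + 1) (by simp only [List.length_cons]; omega),
            pvExpandR_eq cs j (by omega), List.drop_succ_cons]
          omega
        have htok : PySem.List.slice (c :: cs) (some ((j + 1 : Nat) : Int))
              (some ((pvExpandR (c :: cs) (j + 1) : Nat) : Int))
            = PySem.List.slice cs (some ((j : Nat) : Int))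
              (some ((pvExpandR cs j : Nat) : Int)) := by
          rw [hE, PySem.List.slice_natCast, PySem.List.slice_natCast, List.drop_succ_cons]
          congr 1
          omega
        rw [htok]
      · rw [if_neg hc, if_neg hc]
        exact ih c cs pid (j + 1) (by omega) (fun h => absurd h (by omega))
    · rw [pvClsScan_eq (c :: cs) pid (j + 1), if_neg (by simp only [List.length_cons]; omega)]
      rw [pvClsScan_eq cs pid j, if_neg hjl]

theorem pvScan_prefix : ∀ (A : List Char) (cs : List Char) (pid : Int),
    (A ≠ [] → PySem.Chars.isspace (A.getLastD ' ') = true) →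
    pvClsScan (A ++ cs) pid A.length = pvClsScan cs pid 0 := by
  intro A
  induction A with
  | nil => intro cs pid _; rfl
  | cons a A' ih =>
    intro cs pid hlast
    have hstep : pvClsScan (a :: (A' ++ cs)) pid (A'.length + 1)
        = pvClsScan (A' ++ cs) pid A'.length :=
      pvScan_shift (A' ++ cs).length a (A' ++ cs) pid A'.length (by omega)
        (fun h0 => by
          have hA' : A' = [] := List.length_eq_zero_iff.mp h0
          subst hA'
          simpa [List.getLastD] using hlast (by simp))
    have htail : pvClsScan (A' ++ cs) pid A'.length = pvClsScan cs pid 0 := by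
      apply ih
      intro hne
      have h1 := hlast (by simp)
      rw [List.getLastD_cons] at h1
      cases hx : A'.getLast? with
      | none => exact absurd (List.getLast?_eq_none_iff.mp hx) hne
      | some x =>
        rw [List.getLastD_eq_getLast?, hx] at h1 ⊢
        exact h1
    calc pvClsScan ((a :: A') ++ cs) pid (a :: A').length
        = pvClsScan (A' ++ cs) pid A'.length := by simpa using hstep
      _ = pvClsScan cs pid 0 := htail

theorem pvScan_skip : ∀ (d : Nat) (cs : List Char) (pid : Int) (j k : Nat),
    k - j ≤ d → j ≤ k → (∀ j', j ≤ j' → j' < k → pvCond cs j' = false) →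
    pvClsScan cs pid j = pvClsScan cs pid k := by
  intro d
  induction d with
  | zero =>
    intro cs pid j k h1 h2 _
    have : j = k := by omega
    rw [this]
  | succ d ih =>
    intro cs pid j k h1 h2 hcond
    by_cases hjk : j = k
    · rw [hjk]
    · have hjk' : j < k := by omega
      by_cases hj : j < cs.length
      · rw [pvClsScan_eq, if_pos hj, if_neg (by simp [hcond j (le_refl j) hjk'])]
        exact ih cs pid (j + 1) k (by omega) (by omega)
          (fun j' h1' h2' => hcond j' (by omega) h2')
      · rw [pvClsScan_eq, if_neg hj, pvClsScan_eq, if_neg (by omega)]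

-- Source B's class scan finds the first token with an org./com. prefix
theorem pvC : ∀ (n : Nat) (cs : List Char), cs.length ≤ n → ∀ pid : Int,
    pvClsScan cs pid 0 = (match (pvRuns cs).find? pvPClsC with
      | some t => "java-" ++ String.ofList (pvAfterLast '.' t)
      | none => "java-" ++ PySem.Int.toStr pid) := by
  intro n
  induction n with
  | zero =>
    intro cs hlen pid
    have hnil : cs = [] := List.length_eq_zero_iff.mp (by omega)
    subst hnil
    rw [pvClsScan_eq]
    simp [pvRuns]
  | succ n ihn =>
    intro cs hlen pid
    cases cs with
    | nil =>
      rw [pvClsScan_eq]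
      simp [pvRuns]
    | cons c rest =>
      by_cases hs : PySem.Chars.isspace c = true
      · have horg : ¬ (['o','r','g','.'] <+: c :: rest) := by
          intro h
          rw [List.cons_prefix_cons] at h
          rw [← h.1, show PySem.Chars.isspace 'o' = false from rfl] at hs
          simp at hs
        have hcom : ¬ (['c','o','m','.'] <+: c :: rest) := by
          intro h
          rw [List.cons_prefix_cons] at h
          rw [← h.1, show PySem.Chars.isspace 'c' = false from rfl] at hs
          simp at hs
        have hcond0 : pvCond (c :: rest) 0 = false := by
          rw [pvCond_zero, List.drop_zero]
          simp [horg, hcom]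
        have h1 : pvClsScan (c :: rest) pid 0 = pvClsScan (c :: rest) pid 1 := by
          rw [pvClsScan_eq, if_pos (by simp), if_neg (by simp [hcond0])]
        have h2 : pvClsScan (c :: rest) pid 1 = pvClsScan rest pid 0 :=
          pvScan_shift rest.length c rest pid 0 (by omega) (fun _ => hs)
        have hruns : pvRuns (c :: rest) = pvRuns rest := by simp [pvRuns, hs]
        rw [h1, h2, hruns]
        exact ihn rest (by simp at hlen; omega) pid
      · have hnsc : pvNs c = true := by simp [pvNs, hs]
        obtain ⟨T, hT⟩ : ∃ T, rest.takeWhile pvNs = T := ⟨_, rfl⟩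
        obtain ⟨R, hR⟩ : ∃ R, rest.dropWhile pvNs = R := ⟨_, rfl⟩
        have hcs : c :: rest = (c :: T) ++ R := by
          rw [List.cons_append, ← hT, ← hR, List.takeWhile_append_dropWhile]
        have hruns : pvRuns (c :: rest) = (c :: T) :: pvRuns R := by
          simp [pvRuns, hs, hT, hR]
        have htokns : ∀ d ∈ c :: T, pvNs d = true := by
          intro d hd
          rcases List.mem_cons.mp hd with rfl | hd'
          · exact hnsc
          · rw [← hT] at hd'
            exact List.mem_takeWhile_imp hd'
        have htwcs : (c :: rest).takeWhile pvNs = c :: T := by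
          rw [List.takeWhile_cons]
          simp [hnsc, hT]
        have hcond0 : pvCond (c :: rest) 0 = pvPClsC (c :: T) := by
          rw [pvCond_zero, List.drop_zero, pvPClsC, pvStartswith_eq_decide,
            pvStartswith_eq_decide]
          congr 1
          · rw [decide_eq_decide]
            rw [pvPrefix_iff_tok ['o','r','g','.'] (c :: rest) (by intro x hx; fin_cases hx <;> rfl), htwcs]
          · rw [decide_eq_decide]
            rw [pvPrefix_iff_tok ['c','o','m','.'] (c :: rest) (by intro x hx; fin_cases hx <;> rfl), htwcs]
        by_cases hcl : pvPClsC (c :: T) = true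
        · rw [hruns, List.find?_cons_of_pos hcl]
          rw [pvClsScan_eq, if_pos (by simp), if_pos (by rw [hcond0]; exact hcl)]
          have hE : pvExpandR (c :: rest) 0 = (c :: T).length := by
            rw [pvExpandR_eq (c :: rest) 0 (by omega), List.drop_zero, htwcs]
            simp
          have hslice : PySem.List.slice (c :: rest) (some ((0 : Nat) : Int))
              (some ((pvExpandR (c :: rest) 0 : Nat) : Int)) = c :: T := by
            rw [hE, PySem.List.slice_natCast, Nat.sub_zero, List.drop_zero]
            conv_lhs => rw [hcs]
            exact List.take_left
          rw [hslice]
          rw [PySem.List.slice_from _ (by have := pvRfind_ge (c :: T) '.'; omega)]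
          rw [pvRfind_afterLast]
        · rw [hruns, List.find?_cons_of_neg (by simp [hcl])]
          cases R with
          | nil =>
            have hcseq : c :: rest = c :: T := by rw [hcs, List.append_nil]
            have hskip : pvClsScan (c :: rest) pid 0
                = pvClsScan (c :: rest) pid (c :: rest).length := by
              apply pvScan_skip (c :: rest).length _ pid 0 _ (by omega) (by omega)
              intro j' h0 hlt
              cases j' with
              | zero =>
                rw [hcond0]
                exact Bool.eq_false_iff.mpr hcl
              | succ j'' =>
                apply pvCond_false_of_ns _ _ (by omega)
                rw [Nat.add_sub_cancel]
                have hjlt : j'' < (c :: rest).length := by omega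
                have hgd : (c :: rest).getD j'' ' ' = (c :: rest)[j'']'hjlt := by
                  rw [List.getD_eq_getElem?_getD, List.getElem?_eq_getElem hjlt]
                  rfl
                rw [hgd]
                apply pvNs_isspace
                apply htokns
                rw [← hcseq]
                exact List.getElem_mem _
            rw [hskip, pvClsScan_eq, if_neg (by omega)]
            simp [pvRuns]
          | cons sp R' =>
            have hsp : PySem.Chars.isspace sp = true := by
              have h := pvDropWhile_head pvNs rest sp R' (by rw [hR])
              simpa [pvNs] using h
            have hskip : pvClsScan (c :: rest) pid 0
                = pvClsScan (c :: rest) pid ((c :: T).length + 1) := by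
              apply pvScan_skip ((c :: T).length + 1) _ pid 0 _ (by omega) (by omega)
              intro j' h0 hlt
              cases j' with
              | zero =>
                rw [hcond0]
                exact Bool.eq_false_iff.mpr hcl
              | succ j'' =>
                apply pvCond_false_of_ns _ _ (by omega)
                rw [Nat.add_sub_cancel]
                have hjlt : j'' < (c :: T).length := by omega
                have hgd : (c :: rest).getD j'' ' ' = (c :: T)[j'']'hjlt := by
                  have h1 : (c :: rest)[j'']? = (c :: T)[j'']? := by
                    conv_lhs => rw [hcs]
                    exact List.getElem?_append_left hjlt
                  rw [List.getD_eq_getElem?_getD, h1, List.getElem?_eq_getElem hjlt]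
                  rfl
                rw [hgd]
                exact pvNs_isspace (htokns _ (List.getElem_mem _))
            have hpr : pvClsScan (c :: rest) pid ((c :: T).length + 1)
                = pvClsScan R' pid 0 := by
              have hsplit2 : c :: rest = ((c :: T) ++ [sp]) ++ R' := by
                rw [hcs]
                simp
              rw [hsplit2]
              have hlenA : ((c :: T) ++ [sp]).length = (c :: T).length + 1 := by simp
              rw [← hlenA]
              exact pvScan_prefix ((c :: T) ++ [sp]) R' pid (fun _ => by
                rw [List.getLastD_eq_getLast?, List.getLast?_concat]
                simpa using hsp)
            have hrunsR : pvRuns (sp :: R') = pvRuns R' := by simp [pvRuns, hsp]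
            rw [hskip, hpr, hrunsR]
            have hlen' : R'.length ≤ n := by
              have h1 := List.length_dropWhile_le pvNs rest
              rw [hR] at h1
              simp at h1 hlen
              omega
            exact ihn R' hlen' pid

-- ===== VERDICT (by name: the statement is the Claim_ definition above) =====
theorem extract_java_name_py_spec : Claim_equal_extract_java_name_py := by
  intro cmd pid _
  unfold Spec_extract_java_name_py
  simp only [extract_java_name_py, extract_java_name_py_alt]
  have hjl : (".jar" : String).toList = ['.','j','a','r'] := rfl
  by_cases hin : PySem.Str.isIn ".jar" cmd = true
  · rw [if_pos hin]
    have hinC : PySem.Chars.isIn ['.','j','a','r'] cmd.toList = true := by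
      rw [PySem.Str.isIn_eq, hjl] at hin
      exact hin
    have hfind0 : 0 ≤ PySem.Chars.find cmd.toList ['.','j','a','r'] :=
      (PySem.Chars.find_nonneg_iff _ _).mpr ((PySem.Chars.isIn_iff_infix _ _).mp hinC)
    rw [if_pos hfind0]
    have hspec := PySem.Chars.find_spec (s := cmd.toList) (sub := ['.','j','a','r']) hfind0
    have hilen : (PySem.Chars.find cmd.toList ['.','j','a','r']).toNat ≤ cmd.toList.length := by
      have := PySem.Chars.find_le_length cmd.toList ['.','j','a','r']
      omega
    have hJ := pvJ ['.','j','a','r'] (by simp) (by intro x hx; fin_cases hx <;> rfl) cmd.toList.length cmd.toList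
      (le_refl _) (PySem.Chars.find cmd.toList ['.','j','a','r']).toNat hspec.1 hspec.2
    have hcomp : (fun t : List Char => PySem.Chars.isIn ['.','j','a','r'] t) ∘ String.toList
        = fun t : String => PySem.Str.isIn ".jar" t := by
      funext t
      simp [Function.comp, PySem.Str.isIn_eq, hjl]
    have hmap : Option.map String.toList
          ((PySem.Str.split₀ cmd).find? (fun t => PySem.Str.isIn ".jar" t))
        = some (pvTokAt cmd.toList (PySem.Chars.find cmd.toList ['.','j','a','r']).toNat) := by
      rw [← hcomp, ← List.find?_map, PySem.Str.split₀_map_toList, pvSplit0_runs]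
      exact hJ
    obtain ⟨tS, htS, htSl⟩ : ∃ tS,
        (PySem.Str.split₀ cmd).find? (fun t => PySem.Str.isIn ".jar" t) = some tS ∧
        tS.toList = pvTokAt cmd.toList (PySem.Chars.find cmd.toList ['.','j','a','r']).toNat := by
      cases hx : (PySem.Str.split₀ cmd).find? (fun t => PySem.Str.isIn ".jar" t) with
      | none => rw [hx] at hmap; simp at hmap
      | some t => rw [hx] at hmap; exact ⟨t, rfl, by simpa using hmap⟩
    rw [← pvHead_filter] at htS
    have htokB : PySem.List.slice cmd.toList
        (some ((pvExpandL cmd.toList (PySem.Chars.find cmd.toList ['.','j','a','r']).toNat : Nat) : Int))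
        (some ((pvExpandR cmd.toList (PySem.Chars.find cmd.toList ['.','j','a','r']).toNat : Nat) : Int))
        = pvTokAt cmd.toList (PySem.Chars.find cmd.toList ['.','j','a','r']).toNat := by
      rw [PySem.List.slice_natCast]
      exact pvTokB _ _ hilen
    cases hjp : (PySem.Str.split₀ cmd).filter (fun p => PySem.Str.isIn ".jar" p) with
    | nil => rw [hjp] at htS; simp at htS
    | cons q tl =>
      rw [hjp] at htS
      simp at htS
      rw [htokB, PySem.List.slice_from _
        (by have := pvRfind_ge (pvTokAt cmd.toList (PySem.Chars.find cmd.toList ['.','j','a','r']).toNat) '/'; omega),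
        pvRfind_afterLast]
      have hbase :
          ((PySem.List.pyGet? ((PySem.Str.split? q "/").getD []) (-1)).getD "").toList
            = pvAfterLast '/'
                (pvTokAt cmd.toList (PySem.Chars.find cmd.toList ['.','j','a','r']).toNat) := by
        rw [pvSplitLast q '/' "/" rfl, htS, htSl]
      refine String.toList_inj.mp ?_
      rw [String.toList_append, String.toList_append, String.toList_ofList]
      simp only [pvJarName]
      rw [PySem.Str.toList_replace, hbase, hjl, show ("" : String).toList = [] from rfl,
        String.toList_ofList]
  · rw [if_neg hin]
    have hninC : ¬ (0 ≤ PySem.Chars.find cmd.toList ['.','j','a','r']) := by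
      rw [PySem.Chars.find_nonneg_iff]
      intro hinf
      apply hin
      rw [PySem.Str.isIn_eq, hjl]
      exact (PySem.Chars.isIn_iff_infix _ _).mpr hinf
    rw [if_neg hninC, pvALoop_eq, pvC cmd.toList.length cmd.toList (le_refl _) pid]
    have hcomp : pvPClsC ∘ String.toList = pvPCls := by
      funext t
      simp [Function.comp, pvPClsC, pvPCls, PySem.Str.startswith_eq,
        show ("org." : String).toList = ['o','r','g','.'] from rfl,
        show ("com." : String).toList = ['c','o','m','.'] from rfl]
    have hm : (pvRuns cmd.toList).find? pvPClsC
        = Option.map String.toList ((PySem.Str.split₀ cmd).find? pvPCls) := by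
      rw [← hcomp, ← List.find?_map, PySem.Str.split₀_map_toList, pvSplit0_runs]
    cases hfq : (PySem.Str.split₀ cmd).find? pvPCls with
    | none =>
      rw [hfq] at hm
      simp only [Option.map_none] at hm
      rw [hm]
    | some t =>
      rw [hfq] at hm
      simp at hm
      rw [hm]
      refine String.toList_inj.mp ?_
      rw [String.toList_append, String.toList_append]
      congr 1
      rw [String.toList_ofList]
      simp only [pvClassName]
      exact pvSplitLast t '.' "." rfl
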